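-- pv_equiv track=rewrite | github.com/ajeseung/Coding_test_practice | 프로그래머스/2/12978. 배달/배달.py | solution
-- ===== SOURCE A (Python) =====
-- import heapq
--
-- def solution(N, road, K):
--     graph = [[] for _ in range(N+1)]
--
--     # 그래프 구성
--     for a, b, c in road:
--         graph[a].append((b, c))
--         graph[b].append((a, c))
--
--     INF = float('inf')
--     dist = [INF] * (N+1)
--     dist[1] = 0
--
--     pq = [(0, 1)]  # (시간, 노드)
--
--     # 다익스트라
--     while pq:
--         time, node = heapq.heappop(pq)
--         if dist[node] < time:
--             continue
--
--         for nxt, cost in graph[node]: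
--             new_time = time + cost
--             if new_time < dist[nxt]:
--                 dist[nxt] = new_time
--                 heapq.heappush(pq, (new_time, nxt))
--
--     # K 이하인 마을 개수 반환
--     return sum(1 for d in dist if d <= K)
-- ===== SOURCE B (Python) =====
-- def solution(N, road, K):
--     INF = float('inf')
--     dist = [INF] * (N + 1)
--     dist[1] = 0
--     # Bellman-Ford style: relax every road in both directions until a full
--     # pass changes nothing (terminates since costs are non-negative).
--     while True:
--         changed = False
--         for a, b, c in road:
--             if dist[a] + c < dist[b]:
--                 dist[b] = dist[a] + c
--                 changed = True
--             if dist[b] + c < dist[a]: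
--                 dist[a] = dist[b] + c
--                 changed = True
--         if not changed:
--             break
--     return sum(1 for d in dist if d <= K)
-- ===== Notes on version B (the rewrite author's own statement) =====
-- stated objective: alternative
-- what changed: Replaces heap-based lazy-deletion Dijkstra over a built adjacency list with Bellman-Ford-style relaxation of the raw edge list, repeated until a full pass changes nothing; no priority queue or adjacency structure is kept.
-- outside the precondition, e.g. on solution(3, [(2, 3, -5)], 2): A returns 1, B returns 1
import Mathlib
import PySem

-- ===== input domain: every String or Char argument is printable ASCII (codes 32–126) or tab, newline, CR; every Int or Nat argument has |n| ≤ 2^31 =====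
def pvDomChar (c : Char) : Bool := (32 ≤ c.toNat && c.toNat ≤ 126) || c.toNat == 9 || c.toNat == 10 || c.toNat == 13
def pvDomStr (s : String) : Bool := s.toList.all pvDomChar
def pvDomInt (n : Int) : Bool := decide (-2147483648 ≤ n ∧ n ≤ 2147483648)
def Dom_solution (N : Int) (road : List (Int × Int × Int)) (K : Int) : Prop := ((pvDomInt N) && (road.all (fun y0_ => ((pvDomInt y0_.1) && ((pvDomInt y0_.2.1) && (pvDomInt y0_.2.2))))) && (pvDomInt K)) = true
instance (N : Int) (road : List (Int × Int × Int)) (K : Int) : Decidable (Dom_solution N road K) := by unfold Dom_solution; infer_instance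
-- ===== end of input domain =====

-- B replaces heap Dijkstra by edge-list relaxation repeated until a pass changes nothing (alternative
-- algorithm, same return value on Pre_).

-- Shared Python-float semantics: dist entries are `Option Int`, `none` = float('inf').
-- oadd = x + c, oltB = x < y, oleKB = x <= K, exactly as Python compares floats with inf.
def oadd (x : Option Int) (c : Int) : Option Int := x.map (· + c)

def oltB : Option Int → Option Int → Bool
  | some a, some b => a < b
  | some _, none => true
  | none, _ => false

def oleKB : Option Int → Int → Bool
  | some a, k => a ≤ k
  | none, _ => false

-- dist[i] (IndexError inputs lie outside Pre_solution)
def dget (d : List (Option Int)) (i : Int) : Option Int := PySem.List.pyGetD d i none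

-- sum(1 for d in dist if d <= K)
def countLE (dist : List (Option Int)) (K : Int) : Int :=
  dist.foldl (fun acc x => if oleKB x K then acc + 1 else acc) 0

-- fuel for the two while-loops (a totality guard only; proved sufficient under Pre_solution)
def pvFuel (N : Int) (road : List (Int × Int × Int)) : Nat :=
  (N + 1).toNat * (((road.map (fun (e : Int × Int × Int) => e.2.2)).sum).toNat + 2) + 1

-- ===== PORT A =====
-- graph[i].append(y)
def gapp (g : List (List (Int × Int))) (i : Int) (y : Int × Int) : List (List (Int × Int)) :=
  PySem.List.pySetD g i (PySem.List.pyGetD g i [] ++ [y])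

-- body of `for nxt, cost in graph[node]: ...` (dist, pq as state)
def dijkRelax (time : Int) (s : List (Option Int) × List (Int × Int)) (nc : Int × Int) :
    List (Option Int) × List (Int × Int) :=
  let nt := time + nc.2
  if oltB (some nt) (dget s.1 nc.1) then
    (PySem.List.pySetD s.1 nc.1 (some nt), s.2 ++ [(nt, nc.1)])
  else s

-- `while pq:` — heapq is ported by its contract: heappop yields the least (time, node) pair
-- (lexicographic, = PySem.List.min2?), heappush adds a pair; the pq is kept as a plain list.
def dijkLoop (graph : List (List (Int × Int))) :
    Nat → List (Option Int) → List (Int × Int) → List (Option Int)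
  | 0, dist, _ => dist
  | fuel + 1, dist, pq =>
    match PySem.List.min2? pq (fun p => p.1) (fun p => p.2) with
    | none => dist
    | some tn =>
      let rest := pq.erase tn
      if oltB (dget dist tn.2) (some tn.1) then
        dijkLoop graph fuel dist rest
      else
        let s := (PySem.List.pyGetD graph tn.2 []).foldl (dijkRelax tn.1) (dist, rest)
        dijkLoop graph fuel s.1 s.2

def solution (N : Int) (road : List (Int × Int × Int)) (K : Int) : Int :=
  let graph := road.foldl (fun g e => gapp (gapp g e.1 (e.2.1, e.2.2)) e.2.1 (e.1, e.2.2))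
      (List.replicate (N + 1).toNat [])
  let dist0 := PySem.List.pySetD (List.replicate (N + 1).toNat (none : Option Int)) 1 (some 0)
  countLE (dijkLoop graph (pvFuel N road) dist0 [(0, 1)]) K

-- ===== PORT B =====
-- one `if dist[a] + c < dist[b]: dist[b] = dist[a] + c; changed = True`
def bRelax (s : List (Option Int) × Bool) (a b c : Int) : List (Option Int) × Bool :=
  if oltB (oadd (dget s.1 a) c) (dget s.1 b) then
    (PySem.List.pySetD s.1 b (oadd (dget s.1 a) c), true)
  else s

-- one full pass `for a, b, c in road: ...` starting with changed = False
def bPass (road : List (Int × Int × Int)) (dist : List (Option Int)) : List (Option Int) × Bool :=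
  road.foldl (fun s e => bRelax (bRelax s e.1 e.2.1 e.2.2) e.2.1 e.1 e.2.2) (dist, false)

-- `while True: ... if not changed: break`
def bLoop (road : List (Int × Int × Int)) : Nat → List (Option Int) → List (Option Int)
  | 0, dist => dist
  | fuel + 1, dist =>
    let s := bPass road dist
    if s.2 then bLoop road fuel s.1 else s.1

def solution_alt (N : Int) (road : List (Int × Int × Int)) (K : Int) : Int :=
  let dist0 := PySem.List.pySetD (List.replicate (N + 1).toNat (none : Option Int)) 1 (some 0)
  countLE (bLoop road (pvFuel N road) dist0) K

-- ===== PRECONDITION & SPEC =====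
-- Pre_ excludes: N ≤ 0 (A raises IndexError on dist[1]); road endpoints outside -(N+1)..N (A raises
-- IndexError; a negative endpoint -k inside that range is Python's index wraparound for village
-- N+1-k and is kept); negative costs (A's Dijkstra loops forever whenever a negative-cost road is
-- reachable from village 1, and where it happens to return, matching it would need a reachability
-- analysis neither program performs).
def Pre_solution (N : Int) (road : List (Int × Int × Int)) (K : Int) : Prop :=
  1 ≤ N ∧ ∀ e ∈ road, -(N + 1) ≤ e.1 ∧ e.1 ≤ N ∧ -(N + 1) ≤ e.2.1 ∧ e.2.1 ≤ N ∧ 0 ≤ e.2.2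
instance (N : Int) (road : List (Int × Int × Int)) (K : Int) : Decidable (Pre_solution N road K) := by
  unfold Pre_solution; infer_instance

def pvWitness_solution : Int × (List (Int × Int × Int)) × Int := (3, [(1, 2, 1), (2, 3, 3)], 2)

def Spec_solution (N : Int) (road : List (Int × Int × Int)) (K : Int) (out : Int) : Prop :=
  out = solution_alt N road K
instance (N : Int) (road : List (Int × Int × Int)) (K : Int) (out : Int) :
    Decidable (Spec_solution N road K out) := by unfold Spec_solution; infer_instance

-- ===== CLAIM (what is proved, stated in full; the proofs are below) =====
def Claim_equal_solution : Prop := ∀ (N : Int) (road : List (Int × Int × Int)) (K : Int),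
  Dom_solution N road K → Pre_solution N road K → Spec_solution N road K (solution N road K)

-- ===== LEMMAS AND PROOFS =====

-- ---- proof-side notions: village slots, adjacency, walks, the order on Option Int (∞ = none) ----
-- vtx N i is the dist-array slot Python's indexing uses for village name i (negative = wraparound)
def vtx (N i : Int) : Nat := (if i < 0 then i + (N + 1) else i).toNat

def AdjS (N : Int) (road : List (Int × Int × Int)) (n m : Nat) (c : Int) : Prop :=
  ∃ u v : Int, ((u, v, c) ∈ road ∨ (v, u, c) ∈ road) ∧ n = vtx N u ∧ m = vtx N v

inductive SWalk (N : Int) (road : List (Int × Int × Int)) : Nat → Int → Prop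
  | base : SWalk N road 1 0
  | step {n m c w} : SWalk N road n w → AdjS N road n m c → SWalk N road m (w + c)

def OLE : Option Int → Option Int → Prop
  | _, none => True
  | none, some _ => False
  | some a, some b => a ≤ b

def gD (d : List (Option Int)) (n : Nat) : Option Int := d.getD n none

def EdgesOK (N : Int) (road : List (Int × Int × Int)) : Prop :=
  ∀ e ∈ road, -(N + 1) ≤ e.1 ∧ e.1 ≤ N ∧ -(N + 1) ≤ e.2.1 ∧ e.2.1 ≤ N ∧ 0 ≤ e.2.2

def finB (N : Int) (d : List (Option Int)) (e : Int × Int × Int) : Bool :=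
  (gD d (vtx N e.1)).isSome && (gD d (vtx N e.2.1)).isSome

def Fsum (N : Int) (road : List (Int × Int × Int)) (d : List (Option Int)) : Int :=
  (road.map (fun e => if finB N d e then e.2.2 else 0)).sum

def Wnat (road : List (Int × Int × Int)) : Nat :=
  ((road.map (fun (e : Int × Int × Int) => e.2.2)).sum).toNat

def valW (W : Nat) : Option Int → Nat
  | none => W + 1
  | some x => x.toNat

def Sval (W : Nat) (d : List (Option Int)) : Nat := (d.map (valW W)).sum

def Sound (N : Int) (road : List (Int × Int × Int)) (d : List (Option Int)) : Prop :=
  ∀ (n : Nat) (x : Int), gD d n = some x → SWalk N road n x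

def BoundOK (N : Int) (road : List (Int × Int × Int)) (d : List (Option Int)) : Prop :=
  ∀ (n : Nat) (x : Int), gD d n = some x → x ≤ Fsum N road d

def Valid (N : Int) (road : List (Int × Int × Int)) (d : List (Option Int)) : Prop :=
  ∀ (n m : Nat) (c : Int), AdjS N road n m c → OLE (gD d m) (oadd (gD d n) c)

def Good (N : Int) (road : List (Int × Int × Int)) (d : List (Option Int)) : Prop :=
  d.length = (N + 1).toNat ∧ gD d 1 = some 0 ∧ Sound N road d ∧ BoundOK N road d

def EndState (N : Int) (road : List (Int × Int × Int)) (d : List (Option Int)) : Prop :=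
  d.length = (N + 1).toNat ∧ gD d 1 = some 0 ∧ Sound N road d ∧ Valid N road d

structure InvA (N : Int) (road : List (Int × Int × Int)) (d : List (Option Int))
    (pq : List (Int × Int)) : Prop where
  good : Good N road d
  pqr : ∀ p ∈ pq, -(N + 1) ≤ p.2 ∧ p.2 ≤ N
  pqle : ∀ p ∈ pq, OLE (gD d (vtx N p.2)) (some p.1)
  pend : ∀ (n m : Nat) (c : Int), AdjS N road n m c →
    OLE (gD d m) (oadd (gD d n) c) ∨ ∃ t w, (t, w) ∈ pq ∧ vtx N w = n ∧ gD d n = some t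

-- ---- small bridges and order lemmas ----
lemma vtx_lt {N i : Int} (hN : 1 ≤ N) (_h1 : -(N + 1) ≤ i) (h2 : i ≤ N) :
    vtx N i < (N + 1).toNat := by
  unfold vtx
  split <;> omega

lemma vtx_one (N : Int) : vtx N 1 = 1 := by
  unfold vtx
  rw [if_neg (by omega)]
  rfl

lemma pyGetD_wrap {α : Type} (xs : List α) {N i : Int} (d : α) (hN : 1 ≤ N)
    (hlen : xs.length = (N + 1).toNat) (h1 : -(N + 1) ≤ i) (_h2 : i ≤ N) :
    PySem.List.pyGetD xs i d = xs.getD (vtx N i) d := by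
  by_cases h0 : 0 ≤ i
  · have h := PySem.List.pyGetD_natCast xs i.toNat d
    rw [show ((i.toNat : Nat) : Int) = i by omega] at h
    rw [h]
    congr 1
    simp only [vtx, if_neg (by omega : ¬ i < 0)]
  · have hk1 : 0 < (-i).toNat := by omega
    have hk2 : (-i).toNat ≤ xs.length := by omega
    have h := PySem.List.pyGetD_neg_natCast xs (-i).toNat d hk1 hk2
    rw [show (-((-i).toNat : Int)) = i by omega] at h
    rw [h]
    have hlt : xs.length - (-i).toNat < xs.length := by omega
    have hv : vtx N i = xs.length - (-i).toNat := by
      simp only [vtx, if_pos (by omega : i < 0)]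
      omega
    rw [hv, List.getD_eq_getElem?_getD, List.getElem?_eq_getElem hlt]
    rfl

lemma pySetD_wrap {α : Type} (xs : List α) {N i : Int} (v : α) (hN : 1 ≤ N)
    (hlen : xs.length = (N + 1).toNat) (h1 : -(N + 1) ≤ i) (_h2 : i ≤ N) :
    PySem.List.pySetD xs i v = xs.set (vtx N i) v := by
  by_cases h0 : 0 ≤ i
  · rw [PySem.List.pySetD_of_nonneg _ _ h0]
    congr 1
    simp only [vtx, if_neg (by omega : ¬ i < 0)]
  · unfold PySem.List.pySetD PySem.List.pySet? PySem.List.pyIdx?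
    rw [if_neg h0, if_pos (by omega : -(xs.length : Int) ≤ i)]
    simp only [Option.map_some, Option.getD_some]
    congr 1
    simp only [vtx, if_pos (by omega : i < 0)]
    omega

lemma dget_wrap {d : List (Option Int)} {N i : Int} (hN : 1 ≤ N)
    (hlen : d.length = (N + 1).toNat) (h1 : -(N + 1) ≤ i) (h2 : i ≤ N) :
    dget d i = gD d (vtx N i) :=
  pyGetD_wrap d none hN hlen h1 h2

lemma OLE_refl (x : Option Int) : OLE x x := by cases x <;> simp [OLE]

lemma OLE_trans {x y z : Option Int} (h1 : OLE x y) (h2 : OLE y z) : OLE x z := by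
  cases x <;> cases y <;> cases z <;> simp_all [OLE]
  omega

lemma OLE_antisymm {x y : Option Int} (h1 : OLE x y) (h2 : OLE y x) : x = y := by
  cases x <;> cases y <;> simp_all [OLE]; omega

lemma oltB_false_iff {x y : Option Int} : oltB x y = false ↔ OLE y x := by
  cases x <;> cases y <;> simp [oltB, OLE]

lemma OLE_oadd {x y : Option Int} (c : Int) (h : OLE x y) : OLE (oadd x c) (oadd y c) := by
  cases x <;> cases y <;> simp_all [OLE, oadd]

lemma OLE_none (x : Option Int) : OLE x none := by cases x <;> simp [OLE]

lemma oltB_OLE {x y : Option Int} (h : oltB x y = true) : OLE x y := by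
  cases x <;> cases y <;> simp_all [oltB, OLE]
  omega

-- ---- walks ----
lemma adjSP {N : Int} {road : List (Int × Int × Int)} (hE : EdgesOK N road) (hN : 1 ≤ N)
    {n m : Nat} {c : Int} (h : AdjS N road n m c) :
    n < (N + 1).toNat ∧ m < (N + 1).toNat ∧ 0 ≤ c := by
  obtain ⟨u, v, hor, rfl, rfl⟩ := h
  rcases hor with hor | hor
  · have := hE _ hor
    simp only at this
    exact ⟨vtx_lt hN this.1 this.2.1, vtx_lt hN this.2.2.1 this.2.2.2.1, this.2.2.2.2⟩
  · have := hE _ hor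
    simp only at this
    exact ⟨vtx_lt hN this.2.2.1 this.2.2.2.1, vtx_lt hN this.1 this.2.1, this.2.2.2.2⟩

lemma walk_nonneg {N : Int} {road : List (Int × Int × Int)} (hE : EdgesOK N road) (hN : 1 ≤ N)
    {n : Nat} {w : Int} (h : SWalk N road n w) : 0 ≤ w := by
  induction h with
  | base => omega
  | step _ hadj ih => have := adjSP hE hN hadj; omega

-- ---- gD / set lemmas ----
lemma gD_set_self {d : List (Option Int)} {j : Nat} (h : j < d.length) (v : Option Int) :
    gD (d.set j v) j = v := by
  simp [gD, List.getD_eq_getElem?_getD, h]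

lemma gD_set_ne {d : List (Option Int)} {j n : Nat} (h : n ≠ j) (v : Option Int) :
    gD (d.set j v) n = gD d n := by
  simp [gD, List.getD_eq_getElem?_getD, List.getElem?_set_ne (Ne.symm h)]

lemma getD_set_self' {α : Type} {g : List α} {j : Nat} (h : j < g.length) (v dv : α) :
    (g.set j v).getD j dv = v := by
  simp [List.getD_eq_getElem?_getD, h]

lemma getD_set_ne' {α : Type} {g : List α} {j n : Nat} (h : n ≠ j) (v dv : α) :
    (g.set j v).getD n dv = g.getD n dv := by
  simp [List.getD_eq_getElem?_getD, List.getElem?_set_ne (Ne.symm h)]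

lemma gD_eq_getElem {d : List (Option Int)} {n : Nat} (h : n < d.length) : gD d n = d[n] := by
  simp [gD, List.getD_eq_getElem?_getD, List.getElem?_eq_getElem h]

lemma gD_replicate {L n : Nat} : gD (List.replicate L (none : Option Int)) n = none := by
  simp [gD, List.getD_eq_getElem?_getD, List.getElem?_replicate]
  split <;> rfl

lemma sum_set_lt {l : List Nat} {j : Nat} {y : Nat} (hj : j < l.length) (hy : y < l[j]) :
    (l.set j y).sum < l.sum := by
  induction l generalizing j with
  | nil => simp at hj
  | cons a t ih =>
    cases j with
    | zero => simp_all
    | succ j =>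
      simp only [List.set_cons_succ, List.sum_cons]
      have := ih (by simpa using hj) (by simpa using hy)
      omega

-- ---- min2? (heappop contract) ----
lemma min2?_mem' {l : List (Int × Int)} {m : Int × Int}
    (h : PySem.List.min2? l (fun p => p.1) (fun p => p.2) = some m) : m ∈ l := by
  unfold PySem.List.min2? at h
  revert h
  refine List.foldlRecOn (motive := fun o => o = some m → m ∈ l) l _ (b := none)
    (by intro h; cases h) ?_
  intro b hb a ha
  cases b with
  | none => dsimp only; intro h; cases h; exact ha
  | some m0 =>
    dsimp only
    split
    · intro h; cases h; exact ha
    · exact hb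

lemma min2?_isSome {x : Int × Int} {t : List (Int × Int)} :
    (PySem.List.min2? (x :: t) (fun p => p.1) (fun p => p.2)).isSome = true := by
  unfold PySem.List.min2?
  rw [List.foldl_cons]
  refine List.foldlRecOn (motive := fun o => o.isSome = true) t _ (b := some x) rfl ?_
  intro b hb a ha
  cases b with
  | none => cases hb
  | some m0 => dsimp only; split <;> rfl

lemma min2?_none' {l : List (Int × Int)}
    (h : PySem.List.min2? l (fun p => p.1) (fun p => p.2) = none) : l = [] := by
  cases l with
  | nil => rfl
  | cons x t =>
    have := @min2?_isSome x t
    rw [h] at this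
    cases this

-- ---- Fsum lemmas ----
lemma Fsum_nonneg {N : Int} {road : List (Int × Int × Int)} (hE : EdgesOK N road)
    (d : List (Option Int)) : 0 ≤ Fsum N road d := by
  unfold Fsum
  apply List.sum_nonneg
  intro x hx
  simp only [List.mem_map] at hx
  obtain ⟨e, he, rfl⟩ := hx
  have := hE e he
  split <;> omega

lemma Fsum_le_Wsum {N : Int} {road : List (Int × Int × Int)} (hE : EdgesOK N road)
    (d : List (Option Int)) :
    Fsum N road d ≤ (road.map (fun (e : Int × Int × Int) => e.2.2)).sum := by
  unfold Fsum
  apply List.sum_le_sum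
  intro e he
  have := hE e he
  split <;> omega

lemma Fsum_mono {N : Int} {road : List (Int × Int × Int)} (hE : EdgesOK N road)
    {d d' : List (Option Int)} (h : ∀ e ∈ road, finB N d e = true → finB N d' e = true) :
    Fsum N road d ≤ Fsum N road d' := by
  unfold Fsum
  apply List.sum_le_sum
  intro e he
  have := hE e he
  by_cases hf : finB N d e = true
  · simp [hf, h e he hf]
  · simp only [Bool.not_eq_true] at hf; simp [hf]; split <;> omega

lemma Fsum_gain {N : Int} {road : List (Int × Int × Int)} (hE : EdgesOK N road)
    {d d' : List (Option Int)} {e : Int × Int × Int} (he : e ∈ road)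
    (hmono : ∀ e' ∈ road, finB N d e' = true → finB N d' e' = true)
    (h0 : finB N d e = false) (h1 : finB N d' e = true) :
    Fsum N road d + e.2.2 ≤ Fsum N road d' := by
  obtain ⟨l1, l2, rfl⟩ := List.append_of_mem he
  unfold Fsum
  simp only [List.map_append, List.map_cons, List.sum_append, List.sum_cons, h0, h1,
    if_true, if_false, Bool.false_eq_true]
  have g1 : (l1.map (fun e => if finB N d e then e.2.2 else 0)).sum ≤
      (l1.map (fun e => if finB N d' e then e.2.2 else 0)).sum := by
    apply List.sum_le_sum
    intro x hx
    have hxm : x ∈ l1 ++ e :: l2 := by simp [hx]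
    have := hE x hxm
    by_cases hf : finB N d x = true
    · simp [hf, hmono x hxm hf]
    · simp only [Bool.not_eq_true] at hf; simp [hf]; split <;> omega
  have g2 : (l2.map (fun e => if finB N d e then e.2.2 else 0)).sum ≤
      (l2.map (fun e => if finB N d' e then e.2.2 else 0)).sum := by
    apply List.sum_le_sum
    intro x hx
    have hxm : x ∈ l1 ++ e :: l2 := by simp [hx]
    have := hE x hxm
    by_cases hf : finB N d x = true
    · simp [hf, hmono x hxm hf]
    · simp only [Bool.not_eq_true] at hf; simp [hf]; split <;> omega
  omega

-- ---- the single-relaxation workhorse (shared by both algorithms' proofs) ----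
lemma relax_update {N : Int} {road : List (Int × Int × Int)} (hE : EdgesOK N road) (hN : 1 ≤ N)
    {d : List (Option Int)} (hG : Good N road d) {n m : Nat} {c x : Int}
    (hadj : AdjS N road n m c) (hx : gD d n = some x)
    (hlt : oltB (some (x + c)) (gD d m) = true) :
    Good N road (d.set m (some (x + c))) ∧
    (∀ k : Nat, OLE (gD (d.set m (some (x + c))) k) (gD d k)) ∧
    Sval (Wnat road) (d.set m (some (x + c))) < Sval (Wnat road) d := by
  obtain ⟨hlen, hone, hsound, hbound⟩ := hG
  obtain ⟨hnlt, hmlt', hc0⟩ := adjSP hE hN hadj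
  set d' := d.set m (some (x + c)) with hd'
  have hmlt : m < d.length := by omega
  have hwx : SWalk N road n x := hsound n x hx
  have hx0 : 0 ≤ x := walk_nonneg hE hN hwx
  have hwv : SWalk N road m (x + c) := hwx.step hadj
  have hself : gD d' m = some (x + c) := gD_set_self hmlt _
  have hother : ∀ k : Nat, k ≠ m → gD d' k = gD d k := fun k hk => gD_set_ne hk _
  have hfin : ∀ e ∈ road, finB N d e = true → finB N d' e = true := by
    intro e _ hf
    unfold finB at hf ⊢
    by_cases h1 : vtx N e.1 = m <;> by_cases h2 : vtx N e.2.1 = m <;>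
      simp_all
  have hFle : Fsum N road d ≤ Fsum N road d' := Fsum_mono hE hfin
  have hnewle : x + c ≤ Fsum N road d' := by
    cases hdv : gD d m with
    | some old =>
      have : x + c < old := by rw [hdv] at hlt; simpa [oltB] using hlt
      have := hbound m old hdv
      omega
    | none =>
      have hxF : x ≤ Fsum N road d := hbound n x hx
      have hnm : n ≠ m := by
        intro h; rw [h, hdv] at hx; cases hx
      obtain ⟨u, v, hor, hnu, hmv⟩ := hadj
      rcases hor with he | he
      · have : Fsum N road d + c ≤ Fsum N road d' := by
          refine Fsum_gain hE he hfin ?_ ?_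
          · unfold finB
            simp only [← hnu, ← hmv, hdv]
            simp
          · unfold finB
            simp only [← hnu, ← hmv, hself, hother _ hnm, hx]
            simp
        omega
      · have : Fsum N road d + c ≤ Fsum N road d' := by
          refine Fsum_gain hE he hfin ?_ ?_
          · unfold finB
            simp only [← hnu, ← hmv, hdv]
            simp
          · unfold finB
            simp only [← hnu, ← hmv, hself, hother _ hnm, hx]
            simp
        omega
  refine ⟨⟨by simp [hd', hlen], ?_, ?_, ?_⟩, ?_, ?_⟩
  · -- entry 1 survives
    by_cases h1 : (1 : Nat) = m
    · exfalso
      rw [← h1, hone] at hlt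
      simp only [oltB, decide_eq_true_eq] at hlt
      omega
    · rw [hother _ h1]; exact hone
  · -- Sound
    intro k y hy
    by_cases hk : k = m
    · subst hk
      rw [hself] at hy
      cases hy
      exact hwv
    · rw [hother _ hk] at hy
      exact hsound k y hy
  · -- Bound
    intro k y hy
    by_cases hk : k = m
    · subst hk; rw [hself] at hy; cases hy; exact hnewle
    · rw [hother _ hk] at hy
      have := hbound k y hy
      omega
  · -- pointwise OLE
    intro k
    by_cases hk : k = m
    · subst hk; rw [hself]; exact oltB_OLE hlt
    · rw [hother _ hk]; exact OLE_refl _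
  · -- Sval decreases
    unfold Sval
    rw [hd', List.map_set]
    have hjlt : m < (d.map (valW (Wnat road))).length := by simpa using hmlt
    refine sum_set_lt hjlt ?_
    have hgetm : (d.map (valW (Wnat road)))[m] = valW (Wnat road) (gD d m) := by
      rw [gD_eq_getElem hmlt, List.getElem_map]
    rw [hgetm]
    have hW : x + c ≤ (road.map (fun (e : Int × Int × Int) => e.2.2)).sum := by
      have := Fsum_le_Wsum hE d'
      omega
    have hWnn : 0 ≤ (road.map (fun (e : Int × Int × Int) => e.2.2)).sum := by
      have h1 := Fsum_nonneg hE d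
      have h2 := Fsum_le_Wsum hE d
      omega
    cases hdv : gD d m with
    | none =>
      simp only [valW, Wnat]
      omega
    | some old =>
      have hxo : x + c < old := by rw [hdv] at hlt; simpa [oltB] using hlt
      simp only [valW]
      omega

-- ---- adjacency-list construction of port A ----
lemma gapp_len (g : List (List (Int × Int))) (i : Int) (y : Int × Int) :
    (gapp g i y).length = g.length := by
  unfold gapp
  exact PySem.List.length_pySetD g i _

lemma mem_gapp {N : Int} (hN : 1 ≤ N) {g : List (List (Int × Int))}
    (hg : g.length = (N + 1).toNat) {i : Int} (h1 : -(N + 1) ≤ i) (h2 : i ≤ N)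
    {s : Nat} (hs : s < g.length) (y x : Int × Int) :
    (x ∈ (gapp g i y).getD s []) ↔ (x ∈ g.getD s [] ∨ (s = vtx N i ∧ x = y)) := by
  unfold gapp
  rw [pySetD_wrap _ _ hN hg h1 h2, pyGetD_wrap _ _ hN hg h1 h2]
  have hvl : vtx N i < g.length := by rw [hg]; exact vtx_lt hN h1 h2
  by_cases h : s = vtx N i
  · subst h
    rw [getD_set_self' hs]
    simp
  · rw [getD_set_ne' h]
    simp [h]

lemma build_len : ∀ (rs : List (Int × Int × Int)) (g : List (List (Int × Int))),
    (rs.foldl (fun g e => gapp (gapp g e.1 (e.2.1, e.2.2)) e.2.1 (e.1, e.2.2)) g).length =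
      g.length := by
  intro rs
  induction rs with
  | nil => intro g; rfl
  | cons e rs ih =>
    intro g
    rw [List.foldl_cons, ih, gapp_len, gapp_len]

lemma build_mem {N : Int} (hN : 1 ≤ N) :
    ∀ (rs : List (Int × Int × Int)) (g : List (List (Int × Int))),
    (∀ e ∈ rs, -(N + 1) ≤ e.1 ∧ e.1 ≤ N ∧ -(N + 1) ≤ e.2.1 ∧ e.2.1 ≤ N) →
    g.length = (N + 1).toNat →
    ∀ s : Nat, s < (N + 1).toNat → ∀ v c : Int,
    ((v, c) ∈ (rs.foldl (fun g e => gapp (gapp g e.1 (e.2.1, e.2.2)) e.2.1 (e.1, e.2.2)) g).getD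
        s [] ↔
      (v, c) ∈ g.getD s [] ∨ ∃ a : Int, vtx N a = s ∧ ((a, v, c) ∈ rs ∨ (v, a, c) ∈ rs)) := by
  intro rs
  induction rs with
  | nil => intro g _ _ s _ v c; simp
  | cons e rs ih =>
    obtain ⟨ea, eb, ec⟩ := e
    intro g hrs hg s hs v c
    obtain ⟨ha1, ha2, hb1, hb2⟩ := hrs (ea, eb, ec) (by simp)
    dsimp only at ha1 ha2 hb1 hb2
    have hg1 : (gapp g ea (eb, ec)).length = g.length := gapp_len ..
    have hg2 : (gapp (gapp g ea (eb, ec)) eb (ea, ec)).length = g.length := by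
      rw [gapp_len, gapp_len]
    rw [List.foldl_cons]
    dsimp only
    rw [ih _ (fun e' he' => hrs e' (by simp [he'])) (by rw [hg2, hg]) s hs v c]
    rw [mem_gapp hN (by rw [hg1, hg]) hb1 hb2 (by rw [hg1, hg]; exact hs) (ea, ec) (v, c),
      mem_gapp hN hg ha1 ha2 (by rw [hg]; exact hs) (eb, ec) (v, c)]
    constructor
    · intro h
      rcases h with ((hmem | hnew1) | hnew2) | ⟨a, hva, hor⟩
      · exact Or.inl hmem
      · -- appended (eb, ec) at slot vtx ea
        refine Or.inr ⟨ea, hnew1.1.symm, Or.inl ?_⟩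
        have hp := hnew1.2
        simp only [Prod.mk.injEq] at hp
        simp [hp.1, hp.2]
      · -- appended (ea, ec) at slot vtx eb
        refine Or.inr ⟨eb, hnew2.1.symm, Or.inr ?_⟩
        have hp := hnew2.2
        simp only [Prod.mk.injEq] at hp
        simp [hp.1, hp.2]
      · exact Or.inr ⟨a, hva, by tauto⟩
    · intro h
      rcases h with hmem | ⟨a, hva, hor | hor⟩
      · exact Or.inl (Or.inl (Or.inl hmem))
      · rcases List.mem_cons.1 hor with h | h
        · -- (a, v, c) = (ea, eb, ec)
          simp only [Prod.mk.injEq] at h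
          obtain ⟨rfl, rfl, rfl⟩ := h
          exact Or.inl (Or.inl (Or.inr ⟨hva.symm, rfl⟩))
        · exact Or.inr ⟨a, hva, Or.inl h⟩
      · rcases List.mem_cons.1 hor with h | h
        · -- (v, a, c) = (ea, eb, ec)
          simp only [Prod.mk.injEq] at h
          obtain ⟨rfl, rfl, rfl⟩ := h
          exact Or.inl (Or.inr ⟨hva.symm, rfl⟩)
        · exact Or.inr ⟨a, hva, Or.inr h⟩

-- ---- the fixed point is unique ----
lemma valid_lower {N : Int} {road : List (Int × Int × Int)} {d : List (Option Int)}
    (hone : gD d 1 = some 0) (hval : Valid N road d) {n : Nat} {w : Int}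
    (h : SWalk N road n w) : OLE (gD d n) (some w) := by
  induction h with
  | base => rw [hone]; exact OLE_refl _
  | step hw hadj ih =>
    rename_i n m c w
    exact OLE_trans (hval n m c hadj) (OLE_trans (OLE_oadd c ih) (by simp [oadd, OLE]))

lemma end_unique {N : Int} {road : List (Int × Int × Int)} {d1 d2 : List (Option Int)}
    (h1 : EndState N road d1) (h2 : EndState N road d2) : d1 = d2 := by
  obtain ⟨hl1, ho1, hs1, hv1⟩ := h1
  obtain ⟨hl2, ho2, hs2, hv2⟩ := h2
  have key : ∀ n : Nat, gD d1 n = gD d2 n := by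
    intro n
    cases hx : gD d1 n with
    | none =>
      cases hy : gD d2 n with
      | none => rfl
      | some y =>
        have hw := hs2 n y hy
        have := valid_lower ho1 hv1 hw
        rw [hx] at this
        cases this
    | some x =>
      have hw := hs1 n x hx
      have hle := valid_lower ho2 hv2 hw
      cases hy : gD d2 n with
      | none => rw [hy] at hle; cases hle
      | some y =>
        rw [hy] at hle
        have hw2 := hs2 n y hy
        have hle2 := valid_lower ho1 hv1 hw2
        rw [hx] at hle2
        simp only [OLE] at hle hle2
        congr 1
        omega
  refine List.ext_getElem (by omega) ?_
  intro i hi1 hi2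
  have := key i
  rw [gD_eq_getElem hi1, gD_eq_getElem hi2] at this
  exact this

-- ---- the initial state ----
lemma init_gD_ne {N : Int} {n : Nat} (hn : n ≠ 1) :
    gD (PySem.List.pySetD (List.replicate (N + 1).toNat (none : Option Int)) 1 (some 0)) n =
      none := by
  rw [PySem.List.pySetD_of_nonneg _ _ (by omega : (0:Int) ≤ 1),
    show ((1 : Int).toNat) = 1 from rfl, gD_set_ne hn, gD_replicate]

lemma init_good {N : Int} {road : List (Int × Int × Int)} (hN : 1 ≤ N) (hE : EdgesOK N road) :
    Good N road
      (PySem.List.pySetD (List.replicate (N + 1).toNat (none : Option Int)) 1 (some 0)) := by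
  have hone : gD (PySem.List.pySetD (List.replicate (N + 1).toNat (none : Option Int)) 1
      (some 0)) 1 = some 0 := by
    rw [PySem.List.pySetD_of_nonneg _ _ (by omega : (0:Int) ≤ 1),
      show ((1 : Int).toNat) = 1 from rfl]
    exact gD_set_self (by simp; omega) _
  refine ⟨by rw [PySem.List.pySetD_of_nonneg _ _ (by omega : (0:Int) ≤ 1)]; simp, hone, ?_, ?_⟩
  · intro n x hx
    by_cases hn : n = 1
    · subst hn
      rw [hone] at hx
      cases hx
      exact SWalk.base
    · rw [init_gD_ne hn] at hx; cases hx
  · intro n x hx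
    by_cases hn : n = 1
    · subst hn
      rw [hone] at hx
      cases hx
      exact Fsum_nonneg hE _
    · rw [init_gD_ne hn] at hx; cases hx

lemma init_sval {N : Int} (W : Nat) :
    Sval W (PySem.List.pySetD (List.replicate (N + 1).toNat (none : Option Int)) 1 (some 0)) ≤
      (N + 1).toNat * (W + 1) := by
  rw [PySem.List.pySetD_of_nonneg _ _ (by omega : (0:Int) ≤ 1)]
  unfold Sval
  have hlen : ((List.replicate (N + 1).toNat (none : Option Int)).set (1:Int).toNat
      (some 0)).length = (N + 1).toNat := by simp
  have hmem : ∀ x ∈ ((List.replicate (N + 1).toNat (none : Option Int)).set (1:Int).toNat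
      (some 0)).map (valW W), x ≤ W + 1 := by
    intro x hx
    simp only [List.mem_map] at hx
    obtain ⟨y, hy, rfl⟩ := hx
    rcases List.mem_or_eq_of_mem_set hy with hy | rfl
    · have := List.eq_of_mem_replicate hy
      subst this
      simp [valW]
    · simp [valW]
  have := List.sum_le_card_nsmul _ _ hmem
  simpa [hlen] using this

-- ---- port A: the inner `for nxt, cost in graph[node]` fold ----
structure FInv (N : Int) (road : List (Int × Int × Int)) (time : Int) (ns : Nat)
    (L : List (Int × Int)) (d : List (Option Int)) (pq : List (Int × Int)) : Prop where
  good : Good N road d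
  nodev : gD d ns = some time
  pqr : ∀ p ∈ pq, -(N + 1) ≤ p.2 ∧ p.2 ≤ N
  pqle : ∀ p ∈ pq, OLE (gD d (vtx N p.2)) (some p.1)
  pend : ∀ (n m : Nat) (c : Int), AdjS N road n m c →
    OLE (gD d m) (oadd (gD d n) c) ∨
    (∃ t w, (t, w) ∈ pq ∧ vtx N w = n ∧ gD d n = some t) ∨
    (n = ns ∧ ∃ vr : Int, (vr, c) ∈ L ∧ vtx N vr = m)

lemma fold_relax {N : Int} {road : List (Int × Int × Int)} {time : Int} {ns : Nat}
    (hE : EdgesOK N road) (hN : 1 ≤ N) :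
    ∀ (L : List (Int × Int)) (d : List (Option Int)) (q : List (Int × Int)),
    (∀ nc ∈ L, -(N + 1) ≤ nc.1 ∧ nc.1 ≤ N ∧ AdjS N road ns (vtx N nc.1) nc.2) →
    FInv N road time ns L d q →
    FInv N road time ns [] (L.foldl (dijkRelax time) (d, q)).1
      (L.foldl (dijkRelax time) (d, q)).2 ∧
    Sval (Wnat road) (L.foldl (dijkRelax time) (d, q)).1 +
      (L.foldl (dijkRelax time) (d, q)).2.length ≤ Sval (Wnat road) d + q.length := by
  intro L
  induction L with
  | nil =>
    intro d q _ hI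
    refine ⟨⟨hI.good, hI.nodev, hI.pqr, hI.pqle, ?_⟩, le_refl _⟩
    intro n m c hadj
    rcases hI.pend n m c hadj with h | h | ⟨_, _, h, _⟩
    · exact Or.inl h
    · exact Or.inr (Or.inl h)
    · cases h
  | cons nc L ih =>
    intro d q hadjL hI
    obtain ⟨hb1, hb2, hadj⟩ := hadjL nc (by simp)
    have hlen := hI.good.1
    have hdg : dget d nc.1 = gD d (vtx N nc.1) := dget_wrap hN hlen hb1 hb2
    have hmlt : vtx N nc.1 < d.length := by rw [hlen]; exact vtx_lt hN hb1 hb2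
    rw [List.foldl_cons]
    by_cases hcond : oltB (some (time + nc.2)) (dget d nc.1) = true
    · -- relaxation fires
      have hcond' : oltB (some (time + nc.2)) (gD d (vtx N nc.1)) = true := by
        rwa [hdg] at hcond
      have hstep : dijkRelax time (d, q) nc =
          (d.set (vtx N nc.1) (some (time + nc.2)), q ++ [(time + nc.2, nc.1)]) := by
        unfold dijkRelax
        dsimp only
        rw [hcond, if_pos rfl, pySetD_wrap _ _ hN hlen hb1 hb2]
      obtain ⟨hGood', hpt, hSval⟩ := relax_update hE hN hI.good hadj hI.nodev hcond'
      set d' := d.set (vtx N nc.1) (some (time + nc.2)) with hd'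
      set q' := q ++ [(time + nc.2, nc.1)] with hq'
      have hne : ns ≠ vtx N nc.1 := by
        intro h
        have hnd := hI.nodev
        rw [h] at hnd
        rw [hnd] at hcond'
        simp only [oltB, decide_eq_true_eq] at hcond'
        have := adjSP hE hN hadj
        omega
      have hnodev' : gD d' ns = some time := by
        rw [hd', gD_set_ne hne]; exact hI.nodev
      have hself : gD d' (vtx N nc.1) = some (time + nc.2) := gD_set_self hmlt _
      have hI' : FInv N road time ns L d' q' := by
        refine ⟨hGood', hnodev', ?_, ?_, ?_⟩
        · intro p hp
          rcases List.mem_append.1 hp with hp | hp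
          · exact hI.pqr p hp
          · simp only [List.mem_singleton] at hp
            subst hp
            exact ⟨hb1, hb2⟩
        · intro p hp
          rcases List.mem_append.1 hp with hp | hp
          · exact OLE_trans (hpt (vtx N p.2)) (hI.pqle p hp)
          · simp only [List.mem_singleton] at hp
            subst hp
            rw [hself]
            exact OLE_refl _
        · intro n m c hadj'
          rcases hI.pend n m c hadj' with h1 | ⟨t, w, htq, hwv, htd⟩ | ⟨hns, vr, hvr, hvm⟩
          · by_cases hn : n = vtx N nc.1
            · refine Or.inr (Or.inl ⟨time + nc.2, nc.1, by simp [hq'], hn.symm, ?_⟩)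
              rw [hn, hself]
            · refine Or.inl ?_
              rw [hd', gD_set_ne hn]
              exact OLE_trans (hpt m) h1
          · by_cases hn : n = vtx N nc.1
            · refine Or.inr (Or.inl ⟨time + nc.2, nc.1, by simp [hq'], hn.symm, ?_⟩)
              rw [hn, hself]
            · refine Or.inr (Or.inl ⟨t, w, by simp [hq', htq], hwv, ?_⟩)
              rw [hd', gD_set_ne hn]
              exact htd
          · subst hns
            rcases List.mem_cons.1 hvr with hmem | hmem
            · refine Or.inl ?_
              have hv1 : vr = nc.1 := by rw [← hmem]
              have hc1 : c = nc.2 := by rw [← hmem]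
              rw [hnodev', ← hvm, hv1, hc1, hself]
              simp [oadd, OLE]
            · exact Or.inr (Or.inr ⟨rfl, vr, hmem, hvm⟩)
      rw [hstep]
      have hrec := ih d' q' (fun x hx => hadjL x (by simp [hx])) hI'
      refine ⟨hrec.1, ?_⟩
      have hq'len : q'.length = q.length + 1 := by simp [hq']
      have hrec2 := hrec.2
      omega
    · -- no relaxation
      have hcond' : oltB (some (time + nc.2)) (dget d nc.1) = false := by
        simpa using hcond
      have hstep : dijkRelax time (d, q) nc = (d, q) := by
        unfold dijkRelax
        dsimp only
        rw [hcond', if_neg Bool.false_ne_true]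
      rw [hstep]
      have hOLEv : OLE (gD d (vtx N nc.1)) (some (time + nc.2)) := by
        rw [hdg] at hcond'
        exact oltB_false_iff.1 hcond'
      refine ih d q (fun x hx => hadjL x (by simp [hx])) ?_
      refine ⟨hI.good, hI.nodev, hI.pqr, hI.pqle, ?_⟩
      intro n m c hadj'
      rcases hI.pend n m c hadj' with h1 | h2 | ⟨hns, vr, hvr, hvm⟩
      · exact Or.inl h1
      · exact Or.inr (Or.inl h2)
      · subst hns
        rcases List.mem_cons.1 hvr with hmem | hmem
        · refine Or.inl ?_
          have hv1 : vr = nc.1 := by rw [← hmem]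
          have hc1 : c = nc.2 := by rw [← hmem]
          rw [hI.nodev, ← hvm, hv1, hc1]
          simpa [oadd] using hOLEv
        · exact Or.inr (Or.inr ⟨rfl, vr, hmem, hvm⟩)

lemma invA_end {N : Int} {road : List (Int × Int × Int)} {d : List (Option Int)}
    (hI : InvA N road d []) : EndState N road d := by
  obtain ⟨⟨hl, ho, hs, _⟩, _, _, hp⟩ := hI
  refine ⟨hl, ho, hs, ?_⟩
  intro n m c hadj
  rcases hp n m c hadj with h | ⟨t, w, ht, _⟩
  · exact h
  · simp at ht

lemma dloop_run {N : Int} {road : List (Int × Int × Int)} {graph : List (List (Int × Int))}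
    (hE : EdgesOK N road) (hN : 1 ≤ N) (hgl : graph.length = (N + 1).toNat)
    (hgr : ∀ s : Nat, s < (N + 1).toNat → ∀ v c : Int,
      ((v, c) ∈ graph.getD s [] ↔
        ∃ a : Int, vtx N a = s ∧ ((a, v, c) ∈ road ∨ (v, a, c) ∈ road))) :
    ∀ (fuel : Nat) (d : List (Option Int)) (pq : List (Int × Int)),
    InvA N road d pq → Sval (Wnat road) d + pq.length ≤ fuel →
    EndState N road (dijkLoop graph fuel d pq) := by
  intro fuel
  induction fuel with
  | zero =>
    intro d pq hI hF
    have hpq : pq = [] := List.length_eq_zero_iff.1 (by omega)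
    subst hpq
    exact invA_end hI
  | succ f ih =>
    intro d pq hI hF
    cases hmin : PySem.List.min2? pq (fun p => p.1) (fun p => p.2) with
    | none =>
      have hpq := min2?_none' hmin
      have hstep : dijkLoop graph (f + 1) d pq = d := by
        simp only [dijkLoop]; rw [hmin]
      rw [hstep]
      subst hpq
      exact invA_end hI
    | some tn =>
      have htn : tn ∈ pq := min2?_mem' hmin
      have hrl : (pq.erase tn).length = pq.length - 1 := List.length_erase_of_mem htn
      have hpqpos : 0 < pq.length := by
        cases pq
        · simp at htn
        · simp
      obtain ⟨ht21, ht22⟩ := hI.pqr tn htn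
      have hdg : dget d tn.2 = gD d (vtx N tn.2) := dget_wrap hN hI.good.1 ht21 ht22
      by_cases hb : oltB (dget d tn.2) (some tn.1) = true
      · -- stale entry: continue
        have hstep : dijkLoop graph (f + 1) d pq = dijkLoop graph f d (pq.erase tn) := by
          simp only [dijkLoop]; rw [hmin]; dsimp only; rw [hb, if_pos rfl]
        rw [hstep]
        apply ih
        · refine ⟨hI.good, fun p hp => hI.pqr p (List.mem_of_mem_erase hp),
            fun p hp => hI.pqle p (List.mem_of_mem_erase hp), ?_⟩
          intro n m c hadj
          rcases hI.pend n m c hadj with h1 | ⟨t, w, htq, hwv, htd⟩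
          · exact Or.inl h1
          · have hne : (t, w) ≠ tn := by
              intro h
              have ht : t = tn.1 := congrArg Prod.fst h
              have hw : w = tn.2 := congrArg Prod.snd h
              rw [ht] at htd
              rw [hw] at hwv
              rw [← hwv] at htd
              rw [hdg, htd] at hb
              simp [oltB] at hb
            exact Or.inr ⟨t, w, (List.mem_erase_of_ne hne).2 htq, hwv, htd⟩
        · omega
      · -- pop tn and relax its neighbours
        have hb' : oltB (dget d tn.2) (some tn.1) = false := by simpa using hb
        have hnodev : gD d (vtx N tn.2) = some tn.1 := by
          have h1 := hI.pqle tn htn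
          have h2 : OLE (some tn.1) (gD d (vtx N tn.2)) := by
            rw [hdg] at hb'
            exact oltB_false_iff.1 hb'
          exact OLE_antisymm h1 h2
        have hstep : dijkLoop graph (f + 1) d pq =
            dijkLoop graph f
              ((PySem.List.pyGetD graph tn.2 []).foldl (dijkRelax tn.1) (d, pq.erase tn)).1
              ((PySem.List.pyGetD graph tn.2 []).foldl (dijkRelax tn.1) (d, pq.erase tn)).2 := by
          simp only [dijkLoop]; rw [hmin]; dsimp only; rw [hb', if_neg Bool.false_ne_true]
        rw [hstep, pyGetD_wrap graph _ hN hgl ht21 ht22]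
        have hsvt : vtx N tn.2 < (N + 1).toNat := vtx_lt hN ht21 ht22
        have hsubL : ∀ nc ∈ graph.getD (vtx N tn.2) [],
            -(N + 1) ≤ nc.1 ∧ nc.1 ≤ N ∧ AdjS N road (vtx N tn.2) (vtx N nc.1) nc.2 := by
          intro nc hnc
          obtain ⟨a, hva, hor⟩ := (hgr _ hsvt nc.1 nc.2).1 hnc
          refine ⟨?_, ?_, a, nc.1, hor, hva.symm, rfl⟩
          · rcases hor with hor | hor
            · exact (hE _ hor).2.2.1
            · exact (hE _ hor).1
          · rcases hor with hor | hor
            · exact (hE _ hor).2.2.2.1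
            · exact (hE _ hor).2.1
        have hI0 : FInv N road tn.1 (vtx N tn.2) (graph.getD (vtx N tn.2) []) d
            (pq.erase tn) := by
          refine ⟨hI.good, hnodev, fun p hp => hI.pqr p (List.mem_of_mem_erase hp),
            fun p hp => hI.pqle p (List.mem_of_mem_erase hp), ?_⟩
          intro n m c hadj
          rcases hI.pend n m c hadj with h1 | ⟨t, w, htq, hwv, htd⟩
          · exact Or.inl h1
          · by_cases hne : (t, w) = tn
            · have hw : w = tn.2 := congrArg Prod.snd hne
              refine Or.inr (Or.inr ⟨by rw [← hwv, hw], ?_⟩)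
              obtain ⟨u, v, hor, hnu, hmv⟩ := hadj
              have hub : -(N + 1) ≤ u ∧ u ≤ N := by
                rcases hor with hor | hor
                · exact ⟨(hE _ hor).1, (hE _ hor).2.1⟩
                · exact ⟨(hE _ hor).2.2.1, (hE _ hor).2.2.2.1⟩
              have hul : vtx N u < (N + 1).toNat := vtx_lt hN hub.1 hub.2
              have hmem : (v, c) ∈ graph.getD (vtx N u) [] :=
                (hgr _ hul v c).2 ⟨u, rfl, hor⟩
              refine ⟨v, ?_, hmv.symm⟩
              rw [show vtx N tn.2 = vtx N u from by rw [← hw, hwv, hnu]]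
              exact hmem
            · exact Or.inr (Or.inl ⟨t, w, (List.mem_erase_of_ne hne).2 htq, hwv, htd⟩)
        have hfold := fold_relax hE hN (graph.getD (vtx N tn.2) []) d (pq.erase tn) hsubL hI0
        apply ih
        · obtain ⟨hg, hnv, hqr, hqle, hpd⟩ := hfold.1
          refine ⟨hg, hqr, hqle, ?_⟩
          intro n m c hadj
          rcases hpd n m c hadj with h1 | h2 | ⟨_, _, h, _⟩
          · exact Or.inl h1
          · exact Or.inr h2
          · simp at h
        · have h2 := hfold.2
          omega

-- ---- port B: one pass of edge relaxations ----
lemma bRelax_spec {N : Int} {road : List (Int × Int × Int)} (hE : EdgesOK N road) (hN : 1 ≤ N)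
    {d : List (Option Int)} {ch : Bool} (hG : Good N road d) {a b c : Int}
    (ha1 : -(N + 1) ≤ a) (ha2 : a ≤ N) (hb1 : -(N + 1) ≤ b) (hb2 : b ≤ N)
    (hadj : AdjS N road (vtx N a) (vtx N b) c) :
    (bRelax (d, ch) a b c = (d, ch) ∧ OLE (gD d (vtx N b)) (oadd (gD d (vtx N a)) c)) ∨
    (Good N road (bRelax (d, ch) a b c).1 ∧
      Sval (Wnat road) (bRelax (d, ch) a b c).1 < Sval (Wnat road) d ∧
      (bRelax (d, ch) a b c).2 = true) := by
  have hlen := hG.1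
  have hdga : dget d a = gD d (vtx N a) := dget_wrap hN hlen ha1 ha2
  have hdgb : dget d b = gD d (vtx N b) := dget_wrap hN hlen hb1 hb2
  by_cases hcond : oltB (oadd (dget d a) c) (dget d b) = true
  · right
    rw [hdga, hdgb] at hcond
    cases hda : gD d (vtx N a) with
    | none => rw [hda] at hcond; simp [oadd, oltB] at hcond
    | some x =>
      rw [hda] at hcond
      have hcond' : oltB (some (x + c)) (gD d (vtx N b)) = true := by simpa [oadd] using hcond
      obtain ⟨hGood', _, hSval⟩ := relax_update hE hN hG hadj hda hcond'
      have hstep : bRelax (d, ch) a b c = (d.set (vtx N b) (some (x + c)), true) := by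
        unfold bRelax
        dsimp only
        rw [hdga, hdgb, hda,
          show oadd (some x) c = some (x + c) from rfl, hcond', if_pos rfl,
          pySetD_wrap _ _ hN hlen hb1 hb2]
      rw [hstep]
      exact ⟨hGood', hSval, rfl⟩
  · left
    have hcond' : oltB (oadd (dget d a) c) (dget d b) = false := by simpa using hcond
    constructor
    · unfold bRelax
      dsimp only
      rw [hcond', if_neg Bool.false_ne_true]
    · rw [hdga, hdgb] at hcond'
      cases hda : gD d (vtx N a) with
      | none => simp [oadd, OLE]
      | some x =>
        rw [hda] at hcond'
        exact oltB_false_iff.1 hcond'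

lemma btwo_spec {N : Int} {road : List (Int × Int × Int)} (hE : EdgesOK N road) (hN : 1 ≤ N)
    {d : List (Option Int)} {ch : Bool} (hG : Good N road d) {e : Int × Int × Int}
    (he : e ∈ road) :
    (bRelax (bRelax (d, ch) e.1 e.2.1 e.2.2) e.2.1 e.1 e.2.2 = (d, ch) ∧
      OLE (gD d (vtx N e.2.1)) (oadd (gD d (vtx N e.1)) e.2.2) ∧
      OLE (gD d (vtx N e.1)) (oadd (gD d (vtx N e.2.1)) e.2.2)) ∨
    (Good N road (bRelax (bRelax (d, ch) e.1 e.2.1 e.2.2) e.2.1 e.1 e.2.2).1 ∧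
      Sval (Wnat road) (bRelax (bRelax (d, ch) e.1 e.2.1 e.2.2) e.2.1 e.1 e.2.2).1 <
        Sval (Wnat road) d ∧
      (bRelax (bRelax (d, ch) e.1 e.2.1 e.2.2) e.2.1 e.1 e.2.2).2 = true) := by
  obtain ⟨ha1, ha2, hb1, hb2, hc0⟩ := hE e he
  have hadj1 : AdjS N road (vtx N e.1) (vtx N e.2.1) e.2.2 := ⟨e.1, e.2.1, Or.inl he, rfl, rfl⟩
  have hadj2 : AdjS N road (vtx N e.2.1) (vtx N e.1) e.2.2 := ⟨e.2.1, e.1, Or.inr he, rfl, rfl⟩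
  rcases bRelax_spec hE hN hG ha1 ha2 hb1 hb2 hadj1 (ch := ch) with ⟨heq1, hO1⟩ |
    ⟨hG1, hS1, hT1⟩
  · rw [heq1]
    rcases bRelax_spec hE hN hG hb1 hb2 ha1 ha2 hadj2 (ch := ch) with ⟨heq2, hO2⟩ |
      ⟨hG2, hS2, hT2⟩
    · rw [heq2]
      exact Or.inl ⟨rfl, hO1, hO2⟩
    · exact Or.inr ⟨hG2, hS2, hT2⟩
  · set s1 := bRelax (d, ch) e.1 e.2.1 e.2.2 with hs1
    have hpair : s1 = (s1.1, s1.2) := rfl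
    rcases bRelax_spec hE hN hG1 hb1 hb2 ha1 ha2 hadj2 (ch := s1.2) with ⟨heq2, _⟩ |
      ⟨hG2, hS2, hT2⟩
    · rw [hpair, heq2]
      exact Or.inr ⟨hG1, hS1, hT1⟩
    · rw [hpair]
      refine Or.inr ⟨hG2, by omega, hT2⟩

lemma bfold {N : Int} {road : List (Int × Int × Int)} (hE : EdgesOK N road) (hN : 1 ≤ N) :
    ∀ (rs : List (Int × Int × Int)) (d : List (Option Int)) (ch : Bool),
    (∀ e ∈ rs, e ∈ road) → Good N road d →
    Good N road
      ((rs.foldl (fun s e => bRelax (bRelax s e.1 e.2.1 e.2.2) e.2.1 e.1 e.2.2) (d, ch)).1) ∧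
    (((rs.foldl (fun s e => bRelax (bRelax s e.1 e.2.1 e.2.2) e.2.1 e.1 e.2.2) (d, ch)).1 = d ∧
      (rs.foldl (fun s e => bRelax (bRelax s e.1 e.2.1 e.2.2) e.2.1 e.1 e.2.2) (d, ch)).2 = ch ∧
      ∀ e ∈ rs, OLE (gD d (vtx N e.2.1)) (oadd (gD d (vtx N e.1)) e.2.2) ∧
        OLE (gD d (vtx N e.1)) (oadd (gD d (vtx N e.2.1)) e.2.2)) ∨
     (Sval (Wnat road)
        ((rs.foldl (fun s e => bRelax (bRelax s e.1 e.2.1 e.2.2) e.2.1 e.1 e.2.2) (d, ch)).1) <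
        Sval (Wnat road) d ∧
      (rs.foldl (fun s e => bRelax (bRelax s e.1 e.2.1 e.2.2) e.2.1 e.1 e.2.2) (d, ch)).2 =
        true)) := by
  intro rs
  induction rs with
  | nil =>
    intro d ch _ hG
    exact ⟨hG, Or.inl ⟨rfl, rfl, by simp⟩⟩
  | cons e rs ih =>
    intro d ch hsub hG
    rw [List.foldl_cons]
    rcases btwo_spec hE hN hG (ch := ch) (hsub e (by simp)) with ⟨heq, hO1, hO2⟩ |
      ⟨hG2, hS2, hT2⟩
    · rw [heq]
      obtain ⟨hg, hdisj⟩ := ih d ch (fun x hx => hsub x (by simp [hx])) hG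
      refine ⟨hg, ?_⟩
      rcases hdisj with ⟨h1, h2, h3⟩ | ⟨h1, h2⟩
      · refine Or.inl ⟨h1, h2, ?_⟩
        intro x hx
        rcases List.mem_cons.1 hx with hx | hx
        · subst hx; exact ⟨hO1, hO2⟩
        · exact h3 x hx
      · exact Or.inr ⟨h1, h2⟩
    · set s2 := bRelax (bRelax (d, ch) e.1 e.2.1 e.2.2) e.2.1 e.1 e.2.2 with hs2
      have hpair : s2 = (s2.1, s2.2) := rfl
      rw [hpair]
      obtain ⟨hg, hdisj⟩ := ih s2.1 s2.2 (fun x hx => hsub x (by simp [hx])) hG2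
      refine ⟨hg, ?_⟩
      rcases hdisj with ⟨h1, h2, _⟩ | ⟨h1, h2⟩
      · refine Or.inr ⟨?_, ?_⟩
        · rw [h1]; exact hS2
        · rw [h2]; exact hT2
      · exact Or.inr ⟨by omega, h2⟩

lemma bPass_spec {N : Int} {road : List (Int × Int × Int)} (hE : EdgesOK N road) (hN : 1 ≤ N)
    {d : List (Option Int)} (hG : Good N road d) :
    Good N road (bPass road d).1 ∧
    (((bPass road d).1 = d ∧ (bPass road d).2 = false ∧
      ∀ e ∈ road, OLE (gD d (vtx N e.2.1)) (oadd (gD d (vtx N e.1)) e.2.2) ∧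
        OLE (gD d (vtx N e.1)) (oadd (gD d (vtx N e.2.1)) e.2.2)) ∨
     (Sval (Wnat road) (bPass road d).1 < Sval (Wnat road) d ∧ (bPass road d).2 = true)) := by
  unfold bPass
  exact bfold hE hN road d false (fun _ hx => hx) hG

lemma bLoop_run {N : Int} {road : List (Int × Int × Int)} (hE : EdgesOK N road) (hN : 1 ≤ N) :
    ∀ (fuel : Nat) (d : List (Option Int)), Good N road d →
    Sval (Wnat road) d < fuel → EndState N road (bLoop road fuel d) := by
  intro fuel
  induction fuel with
  | zero => intro d _ hF; omega
  | succ f ih =>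
    intro d hG hF
    obtain ⟨hg, hdisj⟩ := bPass_spec hE hN hG
    rcases hdisj with ⟨h1, h2, h3⟩ | ⟨h1, h2⟩
    · have hstep : bLoop road (f + 1) d = (bPass road d).1 := by
        simp only [bLoop]
        rw [h2, if_neg Bool.false_ne_true]
      rw [hstep, h1]
      obtain ⟨hlen, hone, hsound, _⟩ := hG
      refine ⟨hlen, hone, hsound, ?_⟩
      intro n m c hadj
      obtain ⟨u, v, hor, rfl, rfl⟩ := hadj
      rcases hor with hor | hor
      · exact (h3 (u, v, c) hor).1
      · exact (h3 (v, u, c) hor).2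
    · have hstep : bLoop road (f + 1) d = bLoop road f (bPass road d).1 := by
        simp only [bLoop]
        rw [h2, if_pos rfl]
      rw [hstep]
      exact ih (bPass road d).1 hg (by omega)
-- ===== VERDICT (by name: the statement is the Claim_ definition above) =====
theorem solution_spec : Claim_equal_solution := by
  intro N road K hDom hPre
  obtain ⟨hN, hE'⟩ := hPre
  have hE : EdgesOK N road := hE'
  unfold Spec_solution
  simp only [solution, solution_alt]
  set d0 := PySem.List.pySetD (List.replicate (N + 1).toNat (none : Option Int)) 1 (some 0)
    with hd0
  set graph := road.foldl (fun g e => gapp (gapp g e.1 (e.2.1, e.2.2)) e.2.1 (e.1, e.2.2))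
    (List.replicate (N + 1).toNat ([] : List (Int × Int))) with hgraph
  have hG0 : Good N road d0 := init_good hN hE
  have hbnd : ∀ e ∈ road, -(N + 1) ≤ e.1 ∧ e.1 ≤ N ∧ -(N + 1) ≤ e.2.1 ∧ e.2.1 ≤ N :=
    fun e he => ⟨(hE e he).1, (hE e he).2.1, (hE e he).2.2.1, (hE e he).2.2.2.1⟩
  have hgl : graph.length = (N + 1).toNat := by
    rw [hgraph, build_len]
    simp
  have hgr : ∀ s : Nat, s < (N + 1).toNat → ∀ v c : Int,
      ((v, c) ∈ graph.getD s [] ↔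
        ∃ a : Int, vtx N a = s ∧ ((a, v, c) ∈ road ∨ (v, a, c) ∈ road)) := by
    intro s hs v c
    rw [hgraph, build_mem hN road _ hbnd (by simp) s hs v c]
    have hrep : (List.replicate (N + 1).toNat ([] : List (Int × Int))).getD s [] = [] := by
      simp only [List.getD_eq_getElem?_getD, List.getElem?_replicate]
      split <;> rfl
    rw [hrep]
    simp
  have hI0 : InvA N road d0 [(0, 1)] := by
    refine ⟨hG0, ?_, ?_, ?_⟩
    · intro p hp
      simp only [List.mem_singleton] at hp
      subst hp
      exact ⟨by omega, by omega⟩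
    · intro p hp
      simp only [List.mem_singleton] at hp
      subst hp
      rw [show vtx N ((0:Int), (1:Int)).2 = 1 from vtx_one N, hG0.2.1]
      exact OLE_refl _
    · intro n m c hadj
      by_cases hn : n = 1
      · refine Or.inr ⟨0, 1, by simp, ?_, ?_⟩
        · rw [vtx_one, hn]
        · rw [hn, hG0.2.1]
      · refine Or.inl ?_
        rw [init_gD_ne hn]
        rw [show oadd none c = none from rfl]
        exact OLE_none _
  have hSv : Sval (Wnat road) d0 ≤ (N + 1).toNat * (Wnat road + 1) := init_sval _
  have hfuel : pvFuel N road = (N + 1).toNat * (Wnat road + 2) + 1 := rfl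
  have hmul : (N + 1).toNat * (Wnat road + 1) ≤ (N + 1).toNat * (Wnat road + 2) :=
    Nat.mul_le_mul_left _ (by omega)
  have hA : EndState N road (dijkLoop graph (pvFuel N road) d0 [(0, 1)]) := by
    refine dloop_run hE hN hgl hgr (pvFuel N road) d0 [(0, 1)] hI0 ?_
    have : ([((0:Int), (1:Int))]).length = 1 := rfl
    omega
  have hB : EndState N road (bLoop road (pvFuel N road) d0) := by
    refine bLoop_run hE hN (pvFuel N road) d0 hG0 ?_
    omega
  rw [end_unique hA hB]
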